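-- pv_equiv track=rewrite | github.com/nihilistau/shannon-prime | backends/torch/shannon_prime_torch.py | _is_small_prime_sqfree_factorable
-- ===== SOURCE A (Python) =====
-- _SMALL_PRIMES_SQFREE = (2, 3, 5, 7, 11)
--
-- def _is_small_prime_sqfree_factorable(n: int) -> bool:
--     if n < 1:
--         return False
--     d = n
--     for p in _SMALL_PRIMES_SQFREE:
--         c = 0
--         while d % p == 0:
--             d //= p
--             c += 1
--             if c > 1:
--                 return False  # squared prime
--     return d == 1
-- ===== SOURCE B (Python) =====
-- def _is_small_prime_sqfree_factorable(n: int) -> bool: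
--     # squarefree products of distinct primes <= 11 are exactly the positive divisors of 2310 = 2*3*5*7*11
--     return n >= 1 and 2310 % n == 0
-- ===== Notes on version B (the rewrite author's own statement) =====
-- stated objective: simpler
-- what changed: Replaces the per-prime factor-stripping loop with the closed form '1 <= n and 2310 % n == 0', since the squarefree products of distinct primes <= 11 are exactly the positive divisors of 2310 = 2*3*5*7*11.
import Mathlib
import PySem

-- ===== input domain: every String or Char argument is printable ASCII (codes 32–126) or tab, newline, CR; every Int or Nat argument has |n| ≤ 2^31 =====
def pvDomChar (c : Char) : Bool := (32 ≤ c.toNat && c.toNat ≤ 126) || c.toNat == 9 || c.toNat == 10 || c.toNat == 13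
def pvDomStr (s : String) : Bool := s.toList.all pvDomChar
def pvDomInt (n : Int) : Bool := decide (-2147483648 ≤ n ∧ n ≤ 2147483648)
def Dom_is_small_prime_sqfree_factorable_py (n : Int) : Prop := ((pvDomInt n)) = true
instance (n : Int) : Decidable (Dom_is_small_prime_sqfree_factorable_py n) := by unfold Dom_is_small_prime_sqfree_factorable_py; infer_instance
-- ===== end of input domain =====

-- B replaces A's prime-stripping loop with the closed form "n ≥ 1 and 2310 % n == 0" (objective: simpler).

-- ===== PORT A =====
-- inner 'while d % p == 0: d //= p; c += 1; if c > 1: return False' (none = early 'return False');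
-- terminates because c strictly increases and recursion only happens while c + 1 ≤ 1
-- 'fuel' only makes the recursion structural; it is never exhausted: the loop body can run at
-- most twice before 'c > 1' returns, so fuel 2 at c = 0 exactly covers Python's while loop
def pvStrip (p : Int) (fuel : Nat) (d c : Int) : Option Int :=
  match fuel with
  | 0 => some d
  | fuel + 1 =>
    if PySem.Int.mod d p = 0 then
      let d' := PySem.Int.floordiv d p
      let c' := c + 1
      if c' > 1 then none
      else pvStrip p fuel d' c'
    else some d

-- 'for p in _SMALL_PRIMES_SQFREE' with early return propagated
def pvOuter : List Int → Int → Option Int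
  | [], d => some d
  | p :: ps, d =>
    match pvStrip p 2 d 0 with
    | none => none
    | some d' => pvOuter ps d'

def is_small_prime_sqfree_factorable_py (n : Int) : Bool :=
  if n < 1 then false
  else
    match pvOuter [2, 3, 5, 7, 11] n with
    | none => false
    | some d => decide (d = 1)

-- ===== PORT B =====
def is_small_prime_sqfree_factorable_py_alt (n : Int) : Bool :=
  decide (n ≥ 1) && decide (PySem.Int.mod 2310 n = 0)

-- ===== PRECONDITION & SPEC =====
def Spec_is_small_prime_sqfree_factorable_py (n : Int) (out : Bool) : Prop := out = is_small_prime_sqfree_factorable_py_alt n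
instance (n : Int) (out : Bool) : Decidable (Spec_is_small_prime_sqfree_factorable_py n out) := by unfold Spec_is_small_prime_sqfree_factorable_py; infer_instance

-- ===== CLAIM (what is proved, stated in full; the proofs are below) =====
def Claim_equal_is_small_prime_sqfree_factorable_py : Prop := ∀ (n : Int), Dom_is_small_prime_sqfree_factorable_py n → Spec_is_small_prime_sqfree_factorable_py n (is_small_prime_sqfree_factorable_py n)

-- ===== LEMMAS AND PROOFS =====

-- pvStrip at c = 0 runs at most two unfoldings: either no division, or exactly one
theorem pvStrip_zero (p d e : Int) (h : pvStrip p 2 d 0 = some e) :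
    e = d ∨ (PySem.Int.mod d p = 0 ∧ e = PySem.Int.floordiv d p) := by
  by_cases h1 : PySem.Int.mod d p = 0
  · by_cases h2 : PySem.Int.mod (PySem.Int.floordiv d p) p = 0
    · simp [pvStrip, h1, h2] at h
    · simp [pvStrip, h1, h2] at h
      exact Or.inr ⟨h1, h.symm⟩
  · simp [pvStrip, h1] at h
    exact Or.inl h.symm

-- if the inner loop succeeds, d divides e * p
theorem pvStrip_dvd (p d e : Int) (h : pvStrip p 2 d 0 = some e) : d ∣ e * p := by
  rcases pvStrip_zero p d e h with rfl | ⟨hm, rfl⟩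
  · exact Dvd.intro p rfl
  · have := PySem.Int.floordiv_mul_add_mod d p
    rw [hm, add_zero] at this
    exact dvd_of_eq this.symm

-- chaining over the prime list: d divides e * (product of the list)
theorem pvOuter_dvd (ps : List Int) (d e : Int) (h : pvOuter ps d = some e) :
    d ∣ e * ps.prod := by
  induction ps generalizing d with
  | nil =>
    simp [pvOuter] at h
    simp [h]
  | cons p ps ih =>
    simp only [pvOuter] at h
    cases hs : pvStrip p 2 d 0 with
    | none => rw [hs] at h; exact absurd h (by simp)
    | some d' =>
      rw [hs] at h
      have h1 := pvStrip_dvd p d d' hs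
      have h2 := ih d' h
      calc d ∣ d' * p := h1
        _ ∣ (e * ps.prod) * p := mul_dvd_mul_right h2 p
        _ = e * (p :: ps).prod := by rw [List.prod_cons]; ring

-- A true only on divisors of 2310
theorem A_dvd (n : Int) (h : is_small_prime_sqfree_factorable_py n = true) : n ∣ 2310 := by
  unfold is_small_prime_sqfree_factorable_py at h
  by_cases hn : n < 1
  · simp [hn] at h
  · rw [if_neg hn] at h
    cases ho : pvOuter [2, 3, 5, 7, 11] n with
    | none => rw [ho] at h; simp at h
    | some d =>
      rw [ho] at h
      simp at h
      subst h
      have := pvOuter_dvd [2, 3, 5, 7, 11] n 1 ho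
      norm_num at this
      exact this

-- full agreement on 0 ≤ n ≤ 2310, checked by evaluation
set_option maxHeartbeats 4000000 in
set_option maxRecDepth 100000 in
theorem small_agree : ∀ m : Nat, m < 2311 →
    is_small_prime_sqfree_factorable_py (m : Int) = is_small_prime_sqfree_factorable_py_alt (m : Int) := by
  decide

-- ===== VERDICT (by name: the statement is the Claim_ definition above) =====
theorem is_small_prime_sqfree_factorable_py_spec : Claim_equal_is_small_prime_sqfree_factorable_py := by
  intro n _
  unfold Spec_is_small_prime_sqfree_factorable_py
  by_cases hneg : n < 1
  · unfold is_small_prime_sqfree_factorable_py is_small_prime_sqfree_factorable_py_alt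
    simp [hneg]
  · by_cases hbig : n > 2310
    · -- A is false: a true result would force n ∣ 2310 hence n ≤ 2310
      have hA : is_small_prime_sqfree_factorable_py n = false := by
        by_contra h
        have h' : is_small_prime_sqfree_factorable_py n = true := by
          cases hv : is_small_prime_sqfree_factorable_py n
          · exact absurd hv h
          · rfl
        have := Int.le_of_dvd (by norm_num) (A_dvd n h')
        omega
      -- B is false: 2310 % n = 2310 ≠ 0
      have hmod : PySem.Int.mod 2310 n = 2310 := by
        rw [PySem.Int.mod_eq_emod_of_pos (by omega)]
        exact Int.emod_eq_of_lt (by norm_num) (by omega)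
      unfold is_small_prime_sqfree_factorable_py_alt
      rw [hA, hmod]
      simp
    · -- 1 ≤ n ≤ 2310: evaluated case split
      have hm : n = ((n.toNat : Nat) : Int) := by omega
      rw [hm]
      exact small_agree n.toNat (by omega)
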